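-- pv_equiv track=rewrite | github.com/sebastianspicker/outlook-email-rag | src/tools/search_answer_context.py | _find_snippet_bounds
-- ===== SOURCE A (Python) =====
-- def _find_snippet_bounds(body_text: str, snippet: str) -> tuple[int | None, int | None]:
--     """Locate *snippet* in *body_text*, tolerating collapsed whitespace."""
--     if not body_text or not snippet:
--         return None, None
--     exact_start = body_text.find(snippet)
--     if exact_start >= 0:
--         return exact_start, exact_start + len(snippet)
--
--     body_chars: list[str] = []
--     body_map: list[int] = []
--     prev_space = False
--     for idx, char in enumerate(body_text):
--         if char.isspace():
--             if prev_space: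
--                 continue
--             body_chars.append(" ")
--             body_map.append(idx)
--             prev_space = True
--         else:
--             body_chars.append(char)
--             body_map.append(idx)
--             prev_space = False
--     normalized_body = "".join(body_chars)
--     normalized_snippet = " ".join(snippet.split())
--     collapsed_start = normalized_body.find(normalized_snippet)
--     if collapsed_start < 0:
--         return None, None
--     start = body_map[collapsed_start]
--     end = body_map[collapsed_start + len(normalized_snippet) - 1] + 1
--     return start, end
-- ===== SOURCE B (Python) =====
-- def _find_snippet_bounds(body_text: str, snippet: str) -> tuple[int | None, int | None]:
--     """Locate *snippet* in *body_text*, tolerating collapsed whitespace.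
--
--     Direct scan: no normalized copy of the body and no index map; the snippet's
--     tokens are matched in place, allowing any whitespace run between them.
--     """
--     if not body_text or not snippet:
--         return None, None
--     exact = body_text.find(snippet)
--     if exact >= 0:
--         return exact, exact + len(snippet)
--     tokens = snippet.split()
--     if not tokens:
--         # all-whitespace snippet, not literally present: nothing to locate
--         return None, None
--     for start in range(len(body_text)):
--         end = _match_tokens_at(body_text, start, tokens)
--         if end is not None:
--             return start, end
--     return None, None
--
--
-- def _skip_spaces(body: str, pos: int) -> int:
--     while pos < len(body) and body[pos].isspace():
--         pos += 1
--     return pos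
--
--
-- def _match_tokens_at(body: str, start: int, tokens: list[str]):
--     """End index of a match of *tokens* at *start* (>=1 whitespace between), or None."""
--     if not body.startswith(tokens[0], start):
--         return None
--     pos = start + len(tokens[0])
--     for tok in tokens[1:]:
--         nxt = _skip_spaces(body, pos)
--         if nxt == pos:
--             return None
--         if not body.startswith(tok, nxt):
--             return None
--         pos = nxt + len(tok)
--     return pos
-- ===== Notes on version B (the rewrite author's own statement) =====
-- stated objective: alternative
-- what changed: The collapsed-whitespace fallback no longer builds a normalized copy of the body plus a parallel index map and searches in it; B splits the snippet into tokens once and scans the body in place, matching the token sequence directly with any whitespace run allowed between tokens.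
-- intended difference: On a non-empty body and an all-whitespace snippet that is not literally contained in the body, A's negative index body_map[-1] wraps around and A returns (0, end) spanning the whole body although nothing matched; B returns (None, None), the intended 'not found'. — e.g. on _find_snippet_bounds("ab", "\t"): A returns (some 0, some 2), B returns (none, none)
import Mathlib
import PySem

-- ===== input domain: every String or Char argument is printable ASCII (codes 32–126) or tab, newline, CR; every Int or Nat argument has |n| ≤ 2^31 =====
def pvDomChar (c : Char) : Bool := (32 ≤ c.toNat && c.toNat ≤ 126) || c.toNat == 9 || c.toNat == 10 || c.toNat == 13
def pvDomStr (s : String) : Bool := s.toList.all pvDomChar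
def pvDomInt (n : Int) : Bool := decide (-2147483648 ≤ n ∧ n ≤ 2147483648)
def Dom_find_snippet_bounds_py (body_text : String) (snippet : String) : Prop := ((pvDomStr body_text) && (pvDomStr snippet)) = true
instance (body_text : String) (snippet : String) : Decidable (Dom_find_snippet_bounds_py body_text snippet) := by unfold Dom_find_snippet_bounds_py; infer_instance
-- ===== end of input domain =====

-- B replaces A's normalized-body copy and parallel index map by a direct in-place scan
-- that matches the snippet's whitespace-split tokens, allowing any whitespace run
-- between them (objective: alternative algorithm, same exact result outside D_ below).

-- ===== PORT A =====
-- the body of A's for-loop over enumerate(body_text) (state: body_chars, body_map, prev_space)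
def pvStepA (acc : List Char × List Int × Bool) (p : Int × Char) : List Char × List Int × Bool :=
  if PySem.Chars.isspace p.2 then
    (if acc.2.2 then acc else (acc.1 ++ [' '], acc.2.1 ++ [p.1], true))
  else (acc.1 ++ [p.2], acc.2.1 ++ [p.1], false)

def find_snippet_bounds_py (body_text : String) (snippet : String) : Option Int × Option Int :=
  if body_text.toList = [] ∨ snippet.toList = [] then (none, none)
  else
    let exact_start := PySem.Str.find body_text snippet
    if 0 ≤ exact_start then (some exact_start, some (exact_start + PySem.Str.len snippet))
    else
      let st := (PySem.List.enumerate body_text.toList 0).foldl pvStepA ([], [], false)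
      let normalized_body := st.1
      let body_map := st.2.1
      let normalized_snippet := PySem.Chars.join [' '] (PySem.Chars.split₀ snippet.toList)
      let collapsed_start := PySem.Chars.find normalized_body normalized_snippet
      if collapsed_start < 0 then (none, none)
      else
        -- body_map[collapsed_start] and body_map[collapsed_start + len - 1] (wrapping -1):
        -- both indices are always in range, so the pyGetD default 0 is never consulted
        (some (PySem.List.pyGetD body_map collapsed_start 0),
         some (PySem.List.pyGetD body_map (collapsed_start + (normalized_snippet.length : Int) - 1) 0 + 1))

-- ===== PORT B =====
-- while pos < len(body) and body[pos].isspace(): pos += 1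
def pvSkipSpaces (body : List Char) (pos : Nat) : Nat :=
  if h : pos < body.length then
    if PySem.Chars.isspace body[pos] then pvSkipSpaces body (pos + 1) else pos
  else pos
termination_by body.length - pos

-- the loop 'for tok in tokens[1:]' of _match_tokens_at
def pvMatchRest (body : List Char) (pos : Nat) : List (List Char) → Option Int
  | [] => some (pos : Int)
  | tok :: rest =>
    let nxt := pvSkipSpaces body pos
    if nxt = pos then none
    else if PySem.Chars.startswith (body.drop nxt) tok then pvMatchRest body (nxt + tok.length) rest
    else none

def pvMatchTokensAt (body : List Char) (start : Nat) (tokens : List (List Char)) : Option Int :=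
  match tokens with
  | [] => none
  | tok :: rest =>
    if PySem.Chars.startswith (body.drop start) tok then pvMatchRest body (start + tok.length) rest
    else none

-- the loop 'for start in range(len(body_text))'
def pvScan (body : List Char) (tokens : List (List Char)) (start : Nat) : Option Int × Option Int :=
  if h : start < body.length then
    match pvMatchTokensAt body start tokens with
    | some e => (some (start : Int), some e)
    | none => pvScan body tokens (start + 1)
  else (none, none)
termination_by body.length - start

def find_snippet_bounds_py_alt (body_text : String) (snippet : String) : Option Int × Option Int :=
  if body_text.toList = [] ∨ snippet.toList = [] then (none, none)
  else
    let exact := PySem.Str.find body_text snippet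
    if 0 ≤ exact then (some exact, some (exact + PySem.Str.len snippet))
    else
      let tokens := PySem.Chars.split₀ snippet.toList
      if tokens = [] then (none, none)
      else pvScan body_text.toList tokens 0

-- ===== PRECONDITION & SPEC =====
-- On a non-empty body and an all-whitespace snippet that is not literally contained in the
-- body, A's negative index body_map[-1] wraps around and A returns bounds (0, end) spanning
-- the whole body although nothing matched; B returns (None, None), the intended "not found".
def D_find_snippet_bounds_py (body_text : String) (snippet : String) : Prop :=
  body_text.toList ≠ [] ∧ PySem.Chars.strIsspace snippet.toList = true ∧ PySem.Str.isIn snippet body_text = false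
instance (body_text : String) (snippet : String) : Decidable (D_find_snippet_bounds_py body_text snippet) := by
  unfold D_find_snippet_bounds_py; infer_instance

def Spec_find_snippet_bounds_py (body_text : String) (snippet : String) (out : Option Int × Option Int) : Prop :=
  ¬ D_find_snippet_bounds_py body_text snippet → out = find_snippet_bounds_py_alt body_text snippet
instance (body_text : String) (snippet : String) (out : Option Int × Option Int) : Decidable (Spec_find_snippet_bounds_py body_text snippet out) := by
  unfold Spec_find_snippet_bounds_py; infer_instance

def pvDiffWitness_find_snippet_bounds_py : String × String := ("ab", "\t")
def pvDiffWitnessOut_find_snippet_bounds_py : (Option Int × Option Int) × (Option Int × Option Int) :=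
  ((some 0, some 2), (none, none))

-- ===== CLAIM (what is proved, stated in full; the proofs are below) =====
def Claim_unchanged_find_snippet_bounds_py : Prop := ∀ (body_text : String) (snippet : String), Dom_find_snippet_bounds_py body_text snippet → Spec_find_snippet_bounds_py body_text snippet (find_snippet_bounds_py body_text snippet)
def Claim_changed_find_snippet_bounds_py : Prop := Dom_find_snippet_bounds_py (pvDiffWitness_find_snippet_bounds_py.1) (pvDiffWitness_find_snippet_bounds_py.2) ∧ D_find_snippet_bounds_py (pvDiffWitness_find_snippet_bounds_py.1) (pvDiffWitness_find_snippet_bounds_py.2) ∧ find_snippet_bounds_py (pvDiffWitness_find_snippet_bounds_py.1) (pvDiffWitness_find_snippet_bounds_py.2) = pvDiffWitnessOut_find_snippet_bounds_py.1 ∧ find_snippet_bounds_py_alt (pvDiffWitness_find_snippet_bounds_py.1) (pvDiffWitness_find_snippet_bounds_py.2) = pvDiffWitnessOut_find_snippet_bounds_py.2 ∧ pvDiffWitnessOut_find_snippet_bounds_py.1 ≠ pvDiffWitnessOut_find_snippet_bounds_py.2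
def Claim_exact_find_snippet_bounds_py : Prop := ∀ (body_text : String) (snippet : String), Dom_find_snippet_bounds_py body_text snippet → D_find_snippet_bounds_py body_text snippet → find_snippet_bounds_py body_text snippet ≠ find_snippet_bounds_py_alt body_text snippet

-- ===== LEMMAS AND PROOFS =====

-- A's collapse loop as a structural function: list of (normalized char, source index)
def pvNorm (prev : Bool) (i : Nat) : List Char → List (Char × Nat)
  | [] => []
  | c :: r =>
    if PySem.Chars.isspace c then
      if prev then pvNorm true (i + 1) r else (' ', i) :: pvNorm true (i + 1) r
    else (c, i) :: pvNorm false (i + 1) r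

def pvPrevAfter (prev : Bool) : List Char → Bool
  | [] => prev
  | c :: r => pvPrevAfter (PySem.Chars.isspace c) r

def pvGood (t : List Char) : Prop := t ≠ [] ∧ ∀ c ∈ t, PySem.Chars.isspace c = false

def pvWs (ts : List (List Char)) : List Char := (ts.map (fun t => ' ' :: t)).flatten

def pvSp : Char → Bool := fun c => PySem.Chars.isspace c

-- proof-side mirror of B's matcher, suffix-based, returning the matched LENGTH
def pvSpecRest : List Char → List (List Char) → Option Nat
  | _, [] => some 0
  | bs, tok :: rest =>
    let g := (bs.takeWhile pvSp).length
    if g = 0 then none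
    else if tok.isPrefixOf (bs.drop g) then
      (pvSpecRest ((bs.drop g).drop tok.length) rest).map (fun n => g + tok.length + n)
    else none

def pvSpecTok (bs : List Char) (ts : List (List Char)) : Option Nat :=
  match ts with
  | [] => none
  | tok :: rest =>
    if tok.isPrefixOf bs then (pvSpecRest (bs.drop tok.length) rest).map (fun n => tok.length + n)
    else none

lemma pvNorm_cons_space {c : Char} (hc : PySem.Chars.isspace c = true) (prev : Bool) (i : Nat) (r : List Char) :
    pvNorm prev i (c :: r)
      = if prev then pvNorm true (i + 1) r else (' ', i) :: pvNorm true (i + 1) r := by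
  simp [pvNorm, hc]

lemma pvNorm_cons_nonspace {c : Char} (hc : PySem.Chars.isspace c = false) (prev : Bool) (i : Nat) (r : List Char) :
    pvNorm prev i (c :: r) = (c, i) :: pvNorm false (i + 1) r := by
  simp [pvNorm, hc]

lemma pvFoldA (xs : List Char) (i : Nat) (cs : List Char) (ms : List Int) (prev : Bool) :
    (PySem.List.enumerate xs (i : Int)).foldl pvStepA (cs, ms, prev)
      = (cs ++ (pvNorm prev i xs).map Prod.fst,
         ms ++ (pvNorm prev i xs).map (fun q => (q.2 : Int)),
         pvPrevAfter prev xs) := by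
  induction xs generalizing i cs ms prev with
  | nil => simp [PySem.List.enumerate_nil, pvNorm, pvPrevAfter]
  | cons c r ih =>
    rw [PySem.List.enumerate_cons, List.foldl_cons]
    have hcast : (i : Int) + 1 = ((i + 1 : Nat) : Int) := by push_cast; ring
    by_cases hc : PySem.Chars.isspace c
    · cases prev with
      | true =>
        rw [show pvStepA (cs, ms, true) ((i : Int), c) = (cs, ms, true) from by simp [pvStepA, hc]]
        rw [hcast, ih]
        simp [pvNorm, pvPrevAfter, hc]
      | false =>
        rw [show pvStepA (cs, ms, false) ((i : Int), c) = (cs ++ [' '], ms ++ [(i : Int)], true) from by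
          simp [pvStepA, hc]]
        rw [hcast, ih]
        simp [pvNorm, pvPrevAfter, hc]
    · rw [show pvStepA (cs, ms, prev) ((i : Int), c) = (cs ++ [c], ms ++ [(i : Int)], false) from by
        simp [pvStepA, hc]]
      rw [hcast, ih]
      simp [pvNorm, pvPrevAfter, hc]

lemma pvNorm_snd_bounds : ∀ (bs : List Char) (prev : Bool) (i : Nat) (q : Char × Nat),
    q ∈ pvNorm prev i bs → i ≤ q.2 ∧ q.2 < i + bs.length := by
  intro bs
  induction bs with
  | nil => intro prev i q hq; simp [pvNorm] at hq
  | cons c r ih =>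
    intro prev i q hq
    by_cases hc : PySem.Chars.isspace c
    · cases prev with
      | true =>
        simp only [pvNorm, hc, if_true] at hq
        have := ih true (i + 1) q hq
        simp only [List.length_cons]; omega
      | false =>
        simp [pvNorm, hc] at hq
        rcases hq with h | h
        · subst h; simp only [List.length_cons]; omega
        · have := ih true (i + 1) q h
          simp only [List.length_cons]; omega
    · simp [pvNorm, hc] at hq
      rcases hq with h | h
      · subst h; simp only [List.length_cons]; omega
      · have := ih false (i + 1) q h
        simp only [List.length_cons]; omega

lemma pvNorm_snd_pairwise : ∀ (bs : List Char) (prev : Bool) (i : Nat),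
    (pvNorm prev i bs).Pairwise (fun a b => a.2 < b.2) := by
  intro bs
  induction bs with
  | nil => intro prev i; simp [pvNorm]
  | cons c r ih =>
    intro prev i
    by_cases hc : PySem.Chars.isspace c
    · cases prev with
      | true => simpa only [pvNorm, hc, if_true] using ih true (i + 1)
      | false =>
        simp only [pvNorm, hc, if_true]
        rw [if_neg (by simp)]
        exact List.pairwise_cons.mpr
          ⟨fun q hq => by have := pvNorm_snd_bounds r true (i + 1) q hq; omega, ih true (i + 1)⟩
    · simp only [pvNorm]
      rw [if_neg (by simp [hc])]
      exact List.pairwise_cons.mpr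
        ⟨fun q hq => by have := pvNorm_snd_bounds r false (i + 1) q hq; omega, ih false (i + 1)⟩

lemma pvNorm_cover : ∀ (bs : List Char) (prev : Bool) (i j : Nat) (hj : j < bs.length),
    PySem.Chars.isspace bs[j] = false → (bs[j], i + j) ∈ pvNorm prev i bs := by
  intro bs
  induction bs with
  | nil => intro prev i j hj; simp at hj
  | cons c r ih =>
    intro prev i j hj hns
    cases j with
    | zero =>
      simp only [List.getElem_cons_zero] at hns ⊢
      simp [pvNorm, hns]
    | succ j =>
      simp only [List.getElem_cons_succ] at hns ⊢
      have hj' : j < r.length := by simpa using hj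
      have harith : i + 1 + j = i + (j + 1) := by omega
      by_cases hc : PySem.Chars.isspace c
      · cases prev with
        | true =>
          simp only [pvNorm, hc, if_true]
          rw [← harith]; exact ih true (i + 1) j hj' hns
        | false =>
          simp only [pvNorm, hc, if_true]
          rw [if_neg (by simp), ← harith]
          exact List.mem_cons_of_mem _ (ih true (i + 1) j hj' hns)
      · simp only [pvNorm]
        rw [if_neg (by simp [hc]), ← harith]
        exact List.mem_cons_of_mem _ (ih false (i + 1) j hj' hns)

lemma pvNorm_drop : ∀ (bs : List Char) (prev : Bool) (i p : Nat) (hp : p < (pvNorm prev i bs).length),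
    PySem.Chars.isspace ((pvNorm prev i bs)[p].1) = false →
    ∃ k, (pvNorm prev i bs)[p].2 = i + k ∧ k < bs.length ∧
      (pvNorm prev i bs).drop p = pvNorm false (i + k) (bs.drop k) := by
  intro bs
  induction bs with
  | nil => intro prev i p hp; simp [pvNorm] at hp
  | cons c r ih =>
    intro prev i p hp hns
    by_cases hc : PySem.Chars.isspace c
    · cases prev with
      | true =>
        simp only [pvNorm_cons_space hc, reduceIte] at hp hns ⊢
        obtain ⟨k, h1, h2, h3⟩ := ih true (i + 1) p hp hns
        refine ⟨k + 1, by omega, by simp; omega, ?_⟩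
        simp only [List.drop_succ_cons]
        rw [h3]; congr 1; omega
      | false =>
        simp only [pvNorm_cons_space hc, Bool.false_eq_true, if_false, reduceIte] at hp hns ⊢
        cases p with
        | zero =>
          simp only [List.getElem_cons_zero] at hns
          have hsp : PySem.Chars.isspace ' ' = true := by decide
          simp [hsp] at hns
        | succ p =>
          simp only [List.getElem_cons_succ] at hns
          obtain ⟨k, h1, h2, h3⟩ := ih true (i + 1) p (by simp at hp; omega) hns
          refine ⟨k + 1, by simp only [List.getElem_cons_succ]; omega, by simp; omega, ?_⟩
          simp only [List.drop_succ_cons]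
          rw [h3]; congr 1; omega
    · have hc' : PySem.Chars.isspace c = false := by simpa using hc
      simp only [pvNorm_cons_nonspace hc'] at hp hns ⊢
      cases p with
      | zero =>
        refine ⟨0, by simp, by simp, ?_⟩
        simp only [List.drop_zero, Nat.add_zero, List.drop_zero]
        rw [pvNorm_cons_nonspace hc']
      | succ p =>
        simp only [List.getElem_cons_succ] at hns
        obtain ⟨k, h1, h2, h3⟩ := ih false (i + 1) p (by simp at hp; omega) hns
        refine ⟨k + 1, by simp only [List.getElem_cons_succ]; omega, by simp; omega, ?_⟩
        simp only [List.drop_succ_cons]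
        rw [h3]; congr 1; omega

lemma pvNorm_true_eq : ∀ (bs : List Char) (i : Nat),
    pvNorm true i bs = pvNorm false (i + (bs.takeWhile pvSp).length) (bs.dropWhile pvSp) := by
  intro bs
  induction bs with
  | nil => intro i; simp [pvNorm]
  | cons c r ih =>
    intro i
    by_cases hc : PySem.Chars.isspace c
    · have hc' : pvSp c = true := hc
      simp only [pvNorm, hc, if_true, List.takeWhile_cons, hc', List.dropWhile_cons,
        List.length_cons]
      rw [ih]; congr 1; omega
    · have hc' : pvSp c = false := by simpa [pvSp] using hc
      simp only [pvNorm, hc, if_false, List.takeWhile_cons, hc', List.dropWhile_cons]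
      simp [pvNorm, hc]

lemma pvPrefix_append (xs ys zs : List Char) :
    (xs ++ ys <+: zs) ↔ xs <+: zs ∧ ys <+: zs.drop xs.length := by
  constructor
  · rintro ⟨t, rfl⟩
    refine ⟨⟨ys ++ t, by simp⟩, ?_⟩
    rw [List.append_assoc, List.drop_left]
    exact ⟨t, rfl⟩
  · rintro ⟨⟨t', rfl⟩, hy⟩
    rw [List.drop_left] at hy
    obtain ⟨t, rfl⟩ := hy
    exact ⟨t, by simp⟩

lemma pvSpaceNe {b c : Char} (hb : PySem.Chars.isspace b = true) (hc : PySem.Chars.isspace c = false) :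
    c ≠ b := by
  intro h; rw [h, hb] at hc; cases hc

lemma pvNeSpaceChar {c : Char} (hc : PySem.Chars.isspace c = false) : c ≠ ' ' :=
  pvSpaceNe (by decide) hc

lemma pvDropTake (l : List Char) (p : Char → Bool) :
    l.drop (l.takeWhile p).length = l.dropWhile p := by
  induction l with
  | nil => rfl
  | cons c r ih => by_cases h : p c <;> simp [List.takeWhile_cons, List.dropWhile_cons, h, ih]

lemma pvTok : ∀ (tok : List Char), (∀ c ∈ tok, PySem.Chars.isspace c = false) → ∀ (bs : List Char) (i : Nat),
    (tok <+: (pvNorm false i bs).map Prod.fst ↔ tok.isPrefixOf bs = true)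
    ∧ (tok.isPrefixOf bs = true →
        (pvNorm false i bs).drop tok.length = pvNorm false (i + tok.length) (bs.drop tok.length)
        ∧ (tok ≠ [] → ((pvNorm false i bs)[tok.length - 1]?).map Prod.snd = some (i + tok.length - 1))) := by
  intro tok
  induction tok with
  | nil =>
    intro _ bs i
    refine ⟨by simp [List.isPrefixOf], fun _ => ⟨by simp, fun h => absurd rfl h⟩⟩
  | cons c t ih =>
    intro hns bs i
    have hc : PySem.Chars.isspace c = false := hns c (List.mem_cons_self ..)
    have hnst : ∀ c' ∈ t, PySem.Chars.isspace c' = false := fun c' hc' => hns c' (List.mem_cons_of_mem _ hc')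
    cases bs with
    | nil =>
      constructor
      · simp [pvNorm, List.prefix_nil, List.isPrefixOf]
      · intro h; simp [List.isPrefixOf] at h
    | cons b r =>
      by_cases hb : PySem.Chars.isspace b
      · rw [pvNorm_cons_space hb, if_neg (by simp)]
        constructor
        · constructor
          · intro hpre
            rw [List.map_cons, List.cons_prefix_cons] at hpre
            exact absurd hpre.1 (pvNeSpaceChar hc)
          · intro hpre
            rw [List.isPrefixOf_iff_prefix, List.cons_prefix_cons] at hpre
            exact absurd hpre.1 (pvSpaceNe hb hc)
        · intro hpre
          rw [List.isPrefixOf_iff_prefix, List.cons_prefix_cons] at hpre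
          exact absurd hpre.1 (pvSpaceNe hb hc)
      · have hb' : PySem.Chars.isspace b = false := by simpa using hb
        rw [pvNorm_cons_nonspace hb']
        obtain ⟨iha, ihb⟩ := ih hnst r (i + 1)
        constructor
        · rw [List.map_cons, List.cons_prefix_cons]
          simp [iha, List.isPrefixOf_iff_prefix, List.cons_prefix_cons]
        · intro hpre
          rw [List.isPrefixOf_iff_prefix, List.cons_prefix_cons, ← List.isPrefixOf_iff_prefix] at hpre
          obtain ⟨rfl, hpre⟩ := hpre
          obtain ⟨ih1, ih2⟩ := ihb hpre
          refine ⟨?_, ?_⟩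
          · simp only [List.length_cons, List.drop_succ_cons]
            rw [ih1]; congr 1; omega
          · intro _
            cases t with
            | nil => simp
            | cons c2 t2 =>
              have h2 := ih2 (by simp)
              have e1 : ((c :: c2 :: t2).length - 1 : Nat) = t2.length + 1 := by simp
              have e2 : ((c2 :: t2).length - 1 : Nat) = t2.length := by simp
              rw [e1, List.getElem?_cons_succ]
              rw [e2] at h2
              rw [h2]
              congr 1
              simp only [List.length_cons]
              omega

lemma pvRest : ∀ (ts : List (List Char)), (∀ t ∈ ts, pvGood t) → ∀ (bs : List Char) (i : Nat),
    (pvWs ts <+: (pvNorm false i bs).map Prod.fst ↔ (pvSpecRest bs ts).isSome = true)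
    ∧ (∀ n, pvSpecRest bs ts = some n →
        n ≤ bs.length
        ∧ (pvNorm false i bs).drop (pvWs ts).length = pvNorm false (i + n) (bs.drop n)
        ∧ (ts ≠ [] → ((pvNorm false i bs)[(pvWs ts).length - 1]?).map Prod.snd = some (i + n - 1))) := by
  intro ts
  induction ts with
  | nil =>
    intro _ bs i
    refine ⟨by simp [pvWs, pvSpecRest], ?_⟩
    intro n hn
    simp only [pvSpecRest, Option.some.injEq] at hn
    subst hn
    exact ⟨by omega, by simp [pvWs], fun h => absurd rfl h⟩
  | cons tok rest ihr =>
    intro hgood bs i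
    obtain ⟨htne, htns⟩ := hgood tok (List.mem_cons_self ..)
    have hgr : ∀ t ∈ rest, pvGood t := fun t ht => hgood t (List.mem_cons_of_mem _ ht)
    have hws : pvWs (tok :: rest) = ' ' :: (tok ++ pvWs rest) := by simp [pvWs]
    cases bs with
    | nil =>
      refine ⟨⟨?_, ?_⟩, ?_⟩
      · intro hpre; rw [hws] at hpre; simp [pvNorm, List.prefix_nil] at hpre
      · intro hsome; rw [pvSpecRest] at hsome; simp at hsome
      · intro n hn; rw [pvSpecRest] at hn; simp at hn
    | cons b r =>
      by_cases hb : PySem.Chars.isspace b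
      case neg =>
        have hb' : PySem.Chars.isspace b = false := by simpa using hb
        have hspn : pvSpecRest (b :: r) (tok :: rest) = none := by
          rw [pvSpecRest]
          simp [List.takeWhile_cons, show pvSp b = false from hb']
        refine ⟨⟨?_, ?_⟩, ?_⟩
        · intro hpre
          rw [hws, pvNorm_cons_nonspace hb', List.map_cons, List.cons_prefix_cons] at hpre
          exact absurd hpre.1.symm (pvNeSpaceChar hb')
        · intro hsome; rw [hspn] at hsome; simp at hsome
        · intro n hn; rw [hspn] at hn; cases hn
      case pos =>
        set g' := (r.takeWhile pvSp).length with hg'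
        set bs2 := r.dropWhile pvSp with hbs2
        set tl := tok.length with htl
        have hskip : pvNorm true (i + 1) r = pvNorm false (i + 1 + g') bs2 := pvNorm_true_eq r (i + 1)
        have hgb : ((b :: r).takeWhile pvSp).length = g' + 1 := by
          simp [List.takeWhile_cons, show pvSp b = true from hb, hg']
        have hrdrop : r.drop g' = bs2 := by rw [hg', hbs2]; exact pvDropTake r pvSp
        have hdropg : (b :: r).drop (g' + 1) = bs2 := by
          rw [List.drop_succ_cons, hrdrop]
        obtain ⟨tokA, tokB⟩ := pvTok tok htns bs2 (i + 1 + g')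
        have hspec : pvSpecRest (b :: r) (tok :: rest)
            = if tok.isPrefixOf bs2 then (pvSpecRest (bs2.drop tl) rest).map (fun m => (g' + 1) + tl + m)
              else none := by
          rw [pvSpecRest]
          simp only [hgb, hdropg]
          rw [if_neg (by omega)]
        have hP : pvNorm false i (b :: r) = (' ', i) :: pvNorm false (i + 1 + g') bs2 := by
          rw [pvNorm_cons_space hb, if_neg (by simp), hskip]
        constructor
        · rw [hws, hP, List.map_cons, List.cons_prefix_cons, pvPrefix_append]
          by_cases hpre : tok.isPrefixOf bs2
          · have hmapdrop : (List.map Prod.fst (pvNorm false (i + 1 + g') bs2)).drop tl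
                = List.map Prod.fst (pvNorm false (i + 1 + g' + tl) (bs2.drop tl)) := by
              rw [← List.map_drop, (tokB hpre).1]
            rw [hmapdrop, hspec, if_pos hpre]
            have hih := (ihr hgr (bs2.drop tl) (i + 1 + g' + tl)).1
            simp [tokA, hpre, hih]
          · rw [hspec, if_neg hpre]
            simp [tokA, hpre]
        · intro n hn
          rw [hspec] at hn
          by_cases hpre : tok.isPrefixOf bs2
          case neg => rw [if_neg hpre] at hn; cases hn
          rw [if_pos hpre] at hn
          obtain ⟨m, hm, hnm⟩ : ∃ m, pvSpecRest (bs2.drop tl) rest = some m ∧ (g' + 1) + tl + m = n := by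
            cases hmo : pvSpecRest (bs2.drop tl) rest with
            | none => rw [hmo] at hn; cases hn
            | some m => rw [hmo] at hn; exact ⟨m, rfl, by simpa using hn⟩
          subst hnm
          obtain ⟨ihm1, ihm2, ihm3⟩ := (ihr hgr (bs2.drop tl) (i + 1 + g' + tl)).2 m hm
          have htlb : tl ≤ bs2.length := by
            rw [htl]; exact (List.isPrefixOf_iff_prefix.mp hpre).length_le
          have hg'r : g' ≤ r.length := by
            rw [hg']; exact (List.takeWhile_prefix pvSp).length_le
          have hbs2len : bs2.length = r.length - g' := by
            rw [← hrdrop, List.length_drop]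
          have hm1' : m ≤ bs2.length - tl := by
            rw [← List.length_drop]; exact ihm1
          refine ⟨by simp; omega, ?_, ?_⟩
          · rw [hws, hP]
            have hlen : (' ' :: (tok ++ pvWs rest)).length = (tl + (pvWs rest).length) + 1 := by
              simp [htl]
            rw [hlen, List.drop_succ_cons]
            have hdd : List.drop (tl + (pvWs rest).length) (pvNorm false (i + 1 + g') bs2)
                = List.drop (pvWs rest).length (List.drop tl (pvNorm false (i + 1 + g') bs2)) := by
              rw [List.drop_drop]
            rw [hdd, (tokB hpre).1, ihm2]
            rw [show i + 1 + g' + tl + m = i + ((g' + 1) + tl + m) from by omega]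
            rw [List.drop_drop, ← hrdrop, List.drop_drop]
            rw [show (g' + 1) + tl + m = (g' + (tl + m)) + 1 from by omega, List.drop_succ_cons]
          · intro _
            rw [hws, hP]
            have htl1 : 1 ≤ tl := by
              rw [htl]; cases tok with
              | nil => cases htne rfl
              | cons c2 t2 => simp
            have hlen : (' ' :: (tok ++ pvWs rest)).length - 1 = tl + (pvWs rest).length := by
              simp [htl]
            rw [hlen]
            cases rest with
            | nil =>
              have hm0 : m = 0 := by
                simp only [pvSpecRest, Option.some.injEq] at hm
                omega
              subst hm0
              have hend := (tokB hpre).2 htne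
              rw [show (pvWs ([] : List (List Char))).length = 0 from by simp [pvWs]]
              rw [show tl + 0 = (tl - 1) + 1 from by omega, List.getElem?_cons_succ]
              rw [hend]
              congr 1
              omega
            | cons t2 r2 =>
              have hwr1 : 1 ≤ (pvWs (t2 :: r2)).length := by simp [pvWs]
              rw [show tl + (pvWs (t2 :: r2)).length = (tl + ((pvWs (t2 :: r2)).length - 1)) + 1 from by omega,
                List.getElem?_cons_succ]
              have hdd : (pvNorm false (i + 1 + g') bs2)[tl + ((pvWs (t2 :: r2)).length - 1)]?
                  = ((pvNorm false (i + 1 + g') bs2).drop tl)[(pvWs (t2 :: r2)).length - 1]? := by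
                rw [List.getElem?_drop]
              rw [hdd, (tokB hpre).1]
              rw [ihm3 (by simp)]
              congr 1
              omega

lemma pvJoin_shape (t : List Char) (ts : List (List Char)) :
    PySem.Chars.join [' '] (t :: ts) = t ++ pvWs ts := by
  induction ts generalizing t with
  | nil => simp [pvWs, PySem.Chars.join_singleton]
  | cons t' ts ih =>
    rw [PySem.Chars.join_cons_cons, ih t']
    simp [pvWs]

lemma pvTop : ∀ (ts : List (List Char)), (∀ t ∈ ts, pvGood t) → ts ≠ [] → ∀ (bs : List Char) (i : Nat),
    (PySem.Chars.join [' '] ts <+: (pvNorm false i bs).map Prod.fst ↔ (pvSpecTok bs ts).isSome = true)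
    ∧ (∀ n, pvSpecTok bs ts = some n →
        1 ≤ n ∧ n ≤ bs.length
        ∧ ((pvNorm false i bs)[(PySem.Chars.join [' '] ts).length - 1]?).map Prod.snd = some (i + n - 1)) := by
  intro ts hgood hne bs i
  obtain ⟨tok, rest, rfl⟩ : ∃ tok rest, ts = tok :: rest := by
    cases ts with
    | nil => cases hne rfl
    | cons tok rest => exact ⟨tok, rest, rfl⟩
  obtain ⟨htne, htns⟩ := hgood tok (List.mem_cons_self ..)
  have hgr : ∀ t ∈ rest, pvGood t := fun t ht => hgood t (List.mem_cons_of_mem _ ht)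
  have htl1 : 1 ≤ tok.length := by
    cases tok with
    | nil => cases htne rfl
    | cons c2 t2 => simp
  obtain ⟨tokA, tokB⟩ := pvTok tok htns bs i
  rw [pvJoin_shape]
  constructor
  · rw [pvPrefix_append]
    by_cases hpre : tok.isPrefixOf bs
    · have hmapdrop : (List.map Prod.fst (pvNorm false i bs)).drop tok.length
          = List.map Prod.fst (pvNorm false (i + tok.length) (bs.drop tok.length)) := by
        rw [← List.map_drop, (tokB hpre).1]
      rw [hmapdrop, pvSpecTok, if_pos hpre]
      have hih := (pvRest rest hgr (bs.drop tok.length) (i + tok.length)).1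
      simp [tokA, hpre, hih]
    · rw [pvSpecTok, if_neg hpre]
      simp [tokA, hpre]
  · intro n hn
    rw [pvSpecTok] at hn
    by_cases hpre : tok.isPrefixOf bs
    case neg => rw [if_neg hpre] at hn; cases hn
    rw [if_pos hpre] at hn
    obtain ⟨m, hm, hnm⟩ : ∃ m, pvSpecRest (bs.drop tok.length) rest = some m ∧ tok.length + m = n := by
      cases hmo : pvSpecRest (bs.drop tok.length) rest with
      | none => rw [hmo] at hn; cases hn
      | some m => rw [hmo] at hn; exact ⟨m, rfl, by simpa using hn⟩
    subst hnm
    obtain ⟨ihm1, ihm2, ihm3⟩ := (pvRest rest hgr (bs.drop tok.length) (i + tok.length)).2 m hm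
    have htlb : tok.length ≤ bs.length := (List.isPrefixOf_iff_prefix.mp hpre).length_le
    have hm1' : m ≤ bs.length - tok.length := by
      rw [← List.length_drop]; exact ihm1
    refine ⟨by omega, by omega, ?_⟩
    cases rest with
    | nil =>
      have hm0 : m = 0 := by
        simp only [pvSpecRest, Option.some.injEq] at hm
        omega
      subst hm0
      have hend := (tokB hpre).2 htne
      rw [show (tok ++ pvWs ([] : List (List Char))).length - 1 = tok.length - 1 from by simp [pvWs]]
      simpa using hend
    | cons t2 r2 =>
      have hwr1 : 1 ≤ (pvWs (t2 :: r2)).length := by simp [pvWs]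
      rw [show (tok ++ pvWs (t2 :: r2)).length - 1 = tok.length + ((pvWs (t2 :: r2)).length - 1) from by
        simp; omega]
      have hdd : (pvNorm false i bs)[tok.length + ((pvWs (t2 :: r2)).length - 1)]?
          = ((pvNorm false i bs).drop tok.length)[(pvWs (t2 :: r2)).length - 1]? := by
        rw [List.getElem?_drop]
      rw [hdd, (tokB hpre).1, ihm3 (by simp)]
      congr 1
      omega

lemma pvSkip_eq : ∀ (body : List Char) (pos : Nat),
    pvSkipSpaces body pos = pos + ((body.drop pos).takeWhile pvSp).length := by
  intro body pos
  fun_induction pvSkipSpaces body pos with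
  | case1 pos h hsp ih =>
    rw [ih, List.drop_eq_getElem_cons h, List.takeWhile_cons]
    have : pvSp body[pos] = true := hsp
    rw [if_pos this]
    simp; omega
  | case2 pos h hsp =>
    rw [List.drop_eq_getElem_cons h, List.takeWhile_cons]
    have : pvSp body[pos] = false := by simpa using hsp
    rw [if_neg (by simp [this])]
    simp
  | case3 pos h =>
    rw [List.drop_eq_nil_of_le (by omega)]
    simp

lemma pvMatchRest_eq : ∀ (ts : List (List Char)) (body : List Char) (pos : Nat),
    pvMatchRest body pos ts = (pvSpecRest (body.drop pos) ts).map (fun n => ((pos + n : Nat) : Int)) := by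
  intro ts
  induction ts with
  | nil => intro body pos; simp [pvMatchRest, pvSpecRest]
  | cons tok rest ih =>
    intro body pos
    rw [pvMatchRest]
    rw [show pvSkipSpaces body pos = pos + ((body.drop pos).takeWhile pvSp).length from pvSkip_eq body pos]
    set g := ((body.drop pos).takeWhile pvSp).length with hg
    by_cases hg0 : g = 0
    · rw [if_pos (by omega)]
      rw [pvSpecRest]
      simp [← hg, hg0]
    · rw [if_neg (by omega)]
      have hdd : body.drop (pos + g) = (body.drop pos).drop g := (List.drop_drop).symm
      rw [pvSpecRest]
      simp only [← hg]
      rw [if_neg hg0]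
      by_cases hpre : tok.isPrefixOf ((body.drop pos).drop g)
      · have hsw : PySem.Chars.startswith (body.drop (pos + g)) tok = true := by
          rw [hdd]; simpa [PySem.Chars.startswith] using hpre
        rw [if_pos hsw, if_pos hpre, ih]
        have hdd2 : body.drop (pos + g + tok.length) = ((body.drop pos).drop g).drop tok.length := by
          simp [List.drop_drop]
        rw [hdd2]
        cases pvSpecRest (((body.drop pos).drop g).drop tok.length) rest with
        | none => simp
        | some m => simp; omega
      · have hsw : ¬ PySem.Chars.startswith (body.drop (pos + g)) tok = true := by
          rw [hdd]; simpa [PySem.Chars.startswith] using hpre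
        rw [if_neg hsw, if_neg hpre]
        simp

lemma pvMatchTok_eq : ∀ (ts : List (List Char)) (body : List Char) (start : Nat),
    pvMatchTokensAt body start ts = (pvSpecTok (body.drop start) ts).map (fun n => ((start + n : Nat) : Int)) := by
  intro ts body start
  cases ts with
  | nil => simp [pvMatchTokensAt, pvSpecTok]
  | cons tok rest =>
    rw [pvMatchTokensAt, pvSpecTok]
    by_cases hpre : tok.isPrefixOf (body.drop start)
    · have hsw : PySem.Chars.startswith (body.drop start) tok = true := by
        simpa [PySem.Chars.startswith] using hpre
      rw [if_pos hsw, if_pos hpre, pvMatchRest_eq]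
      have hdd : body.drop (start + tok.length) = (body.drop start).drop tok.length := (List.drop_drop).symm
      rw [hdd]
      cases pvSpecRest ((body.drop start).drop tok.length) rest with
      | none => simp
      | some m => simp; omega
    · have hsw : ¬ PySem.Chars.startswith (body.drop start) tok = true := by
        simpa [PySem.Chars.startswith] using hpre
      rw [if_neg hsw, if_neg hpre]
      simp

lemma pvSpecTok_space : ∀ (ts : List (List Char)) (bs : List Char), (∀ t ∈ ts, pvGood t) → ts ≠ [] →
    (∀ c ∈ bs.head?, PySem.Chars.isspace c = true) → pvSpecTok bs ts = none := by
  intro ts bs hgood hne hsp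
  cases ts with
  | nil => cases hne rfl
  | cons tok rest =>
    obtain ⟨htne, htns⟩ := hgood tok (List.mem_cons_self ..)
    obtain ⟨c, t, rfl⟩ : ∃ c t, tok = c :: t := by
      cases tok with
      | nil => cases htne rfl
      | cons c t => exact ⟨c, t, rfl⟩
    have hc : PySem.Chars.isspace c = false := htns c (List.mem_cons_self ..)
    rw [pvSpecTok]
    cases bs with
    | nil => simp [List.isPrefixOf]
    | cons b r =>
      have hb : PySem.Chars.isspace b = true := hsp b (by simp)
      rw [if_neg ?_]
      intro hpre
      rw [List.isPrefixOf_iff_prefix, List.cons_prefix_cons] at hpre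
      exact pvSpaceNe hb hc hpre.1

lemma pvScan_none : ∀ (body : List Char) (ts : List (List Char)) (start : Nat),
    (∀ j, start ≤ j → j < body.length → pvMatchTokensAt body j ts = none) →
    pvScan body ts start = (none, none) := by
  intro body ts start hnone
  fun_induction pvScan body ts start with
  | case1 start h e heq =>
    rw [hnone start le_rfl h] at heq
    cases heq
  | case2 start h heq ih =>
    exact ih (fun j hj1 hj2 => hnone j (by omega) hj2)
  | case3 start h => rfl

lemma pvScan_found : ∀ (body : List Char) (ts : List (List Char)) (start m : Nat) (u : Int),
    start ≤ m → m < body.length →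
    (∀ j, start ≤ j → j < m → pvMatchTokensAt body j ts = none) →
    pvMatchTokensAt body m ts = some u →
    pvScan body ts start = (some (m : Int), some u) := by
  intro body ts start m u hsm hm hnone hsome
  fun_induction pvScan body ts start with
  | case1 start h e heq =>
    rcases Nat.lt_or_ge start m with hlt | hge
    · rw [hnone start le_rfl hlt] at heq; cases heq
    · have : start = m := by omega
      subst this
      rw [hsome] at heq
      cases heq
      rfl
  | case2 start h heq ih =>
    rcases Nat.lt_or_ge start m with hlt | hge
    · exact ih (by omega) (fun j hj1 hj2 => hnone j (by omega) hj2)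
    · have : start = m := by omega
      subst this
      rw [hsome] at heq
      cases heq
  | case3 start h =>
    rcases Nat.lt_or_ge start m with hlt | hge
    · omega
    · have : start = m := by omega
      omega

lemma pvGo_good : ∀ (s cur : List Char) (acc : List (List Char)),
    (∀ c ∈ cur, PySem.Chars.isspace c = false) → (∀ t ∈ acc, pvGood t) →
    ∀ t ∈ PySem.Chars.split₀.go s cur acc, pvGood t := by
  intro s
  induction s with
  | nil =>
    intro cur acc hcur hacc t ht
    rw [PySem.Chars.split₀.go.eq_1] at ht
    by_cases he : cur.isEmpty
    · rw [if_pos he] at ht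
      exact hacc t (by simpa using ht)
    · rw [if_neg he] at ht
      rw [List.mem_reverse, List.mem_cons] at ht
      rcases ht with rfl | ht
      · exact ⟨by simpa using he, fun c hc => hcur c (by simpa using hc)⟩
      · exact hacc t ht
  | cons c rest ih =>
    intro cur acc hcur hacc t ht
    rw [PySem.Chars.split₀.go.eq_2] at ht
    by_cases hc : PySem.Chars.isspace c
    · rw [if_pos hc] at ht
      by_cases he : cur.isEmpty
      · rw [if_pos he] at ht
        exact ih [] acc (by simp) hacc t ht
      · rw [if_neg he] at ht
        refine ih [] _ (by simp) ?_ t ht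
        intro t' ht'
        rw [List.mem_cons] at ht'
        rcases ht' with rfl | ht'
        · exact ⟨by simpa using he, fun c' hc' => hcur c' (by simpa using hc')⟩
        · exact hacc t' ht'
    · rw [if_neg hc] at ht
      refine ih (c :: cur) acc ?_ hacc t ht
      intro c' hc'
      rw [List.mem_cons] at hc'
      rcases hc' with rfl | hc'
      · simpa using hc
      · exact hcur c' hc'

lemma pvSplit_good : ∀ (s : List Char) (t : List Char), t ∈ PySem.Chars.split₀ s → pvGood t := by
  intro s t ht
  exact pvGo_good s [] [] (by simp) (by simp) t ht

lemma pvGo_nil : ∀ (s cur : List Char) (acc : List (List Char)),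
    PySem.Chars.split₀.go s cur acc = [] →
    acc = [] ∧ cur = [] ∧ ∀ c ∈ s, PySem.Chars.isspace c = true := by
  intro s
  induction s with
  | nil =>
    intro cur acc h
    rw [PySem.Chars.split₀.go.eq_1] at h
    by_cases he : cur.isEmpty
    · rw [if_pos he] at h
      exact ⟨by simpa using h, by simpa using he, by simp⟩
    · rw [if_neg he] at h
      simp at h
  | cons c rest ih =>
    intro cur acc h
    rw [PySem.Chars.split₀.go.eq_2] at h
    by_cases hc : PySem.Chars.isspace c
    · rw [if_pos hc] at h
      by_cases he : cur.isEmpty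
      · rw [if_pos he] at h
        obtain ⟨h1, _, h3⟩ := ih [] acc h
        exact ⟨h1, by simpa using he, by
          intro c' hc'
          rcases List.mem_cons.mp hc' with rfl | hc'
          · exact hc
          · exact h3 c' hc'⟩
      · rw [if_neg he] at h
        obtain ⟨h1, _, _⟩ := ih [] _ h
        cases h1
    · rw [if_neg hc] at h
      obtain ⟨_, h2, _⟩ := ih (c :: cur) acc h
      cases h2

lemma pvSplit_nil : ∀ (s : List Char), PySem.Chars.split₀ s = [] → ∀ c ∈ s, PySem.Chars.isspace c = true := by
  intro s h
  exact (pvGo_nil s [] [] h).2.2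

lemma pvGo_allspace : ∀ (s : List Char), (∀ c ∈ s, PySem.Chars.isspace c = true) →
    ∀ acc, PySem.Chars.split₀.go s [] acc = acc.reverse := by
  intro s
  induction s with
  | nil => intro _ acc; rw [PySem.Chars.split₀.go.eq_1]; simp
  | cons c rest ih =>
    intro hsp acc
    rw [PySem.Chars.split₀.go.eq_2]
    rw [if_pos (hsp c (by simp))]
    simpa using ih (fun c' hc' => hsp c' (by simp [hc'])) acc

lemma pvSplit_allspace : ∀ (s : List Char), (∀ c ∈ s, PySem.Chars.isspace c = true) → PySem.Chars.split₀ s = [] := by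
  intro s h
  have := pvGo_allspace s h []
  simpa [PySem.Chars.split₀] using this

lemma pvNoMatchAt (body : List Char) (ts : List (List Char)) (hgood : ∀ t ∈ ts, pvGood t) (hne : ts ≠ [])
    (j : Nat) (hj : j < body.length)
    (hnopre : ∀ p, (hp : p < (pvNorm false 0 body).length) → (pvNorm false 0 body)[p].2 = j →
        ¬ (PySem.Chars.join [' '] ts <+: ((pvNorm false 0 body).map Prod.fst).drop p)) :
    pvSpecTok (body.drop j) ts = none := by
  by_cases hsp : PySem.Chars.isspace (body[j]'hj) = true
  · apply pvSpecTok_space ts _ hgood hne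
    intro c hc
    rw [List.head?_drop, List.getElem?_eq_getElem hj] at hc
    simp only [Option.mem_def, Option.some.injEq] at hc
    subst hc
    exact hsp
  · have hsp' : PySem.Chars.isspace (body[j]'hj) = false := by simpa using hsp
    cases hmo : pvSpecTok (body.drop j) ts with
    | none => rfl
    | some n =>
      exfalso
      have hmem := pvNorm_cover body false 0 j hj hsp'
      rw [Nat.zero_add] at hmem
      obtain ⟨p, hp, hPp⟩ := List.mem_iff_getElem.mp hmem
      have hns : PySem.Chars.isspace ((pvNorm false 0 body)[p].1) = false := by rw [hPp]; exact hsp'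
      obtain ⟨k, hk1, hk2, hk3⟩ := pvNorm_drop body false 0 p hp hns
      rw [Nat.zero_add] at hk1 hk3
      have hkj : k = j := by rw [hPp] at hk1; omega
      subst hkj
      have hpre := ((pvTop ts hgood hne (body.drop k) k).1).mpr (by simp [hmo])
      apply hnopre p hp (by rw [hPp])
      rw [← List.map_drop, hk3]
      exact hpre

-- ===== VERDICT (by name: the statement is the Claim_ definition above) =====
theorem find_snippet_bounds_py_spec : Claim_unchanged_find_snippet_bounds_py := by
  intro body snippet _
  unfold Spec_find_snippet_bounds_py
  intro hnD
  simp only [find_snippet_bounds_py, find_snippet_bounds_py_alt]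
  by_cases h0 : body.toList = [] ∨ snippet.toList = []
  · rw [if_pos h0, if_pos h0]
  · rw [if_neg h0, if_neg h0]
    obtain ⟨hb0, hs0⟩ := not_or.mp h0
    by_cases hex : 0 ≤ PySem.Str.find body snippet
    · rw [if_pos hex, if_pos hex]
    · rw [if_neg hex, if_neg hex]
      have hfold := pvFoldA body.toList 0 [] [] false
      simp only [Nat.cast_zero, List.nil_append] at hfold
      rw [hfold]
      dsimp only
      set P := pvNorm false 0 body.toList with hPdef
      set bm := P.map (fun q => ((q.2 : Nat) : Int)) with hbmdef
      set nb := P.map Prod.fst with hnbdef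
      set ts := PySem.Chars.split₀ snippet.toList with htsdef
      set ns := PySem.Chars.join [' '] ts with hnsdef
      by_cases hts : ts = []
      · exfalso
        have hall := pvSplit_nil snippet.toList (by rw [← htsdef]; exact hts)
        have hiss : PySem.Chars.strIsspace snippet.toList = true := by
          rw [PySem.Chars.strIsspace]
          simp only [Bool.and_eq_true, Bool.not_eq_true', List.isEmpty_eq_false_iff, List.all_eq_true]
          exact ⟨by simpa using hs0, hall⟩
        have hisin : PySem.Str.isIn snippet body = true := by
          by_contra hin
          exact hnD ⟨hb0, hiss, by simpa using hin⟩
        exact hex ((PySem.Str.find_nonneg_iff body snippet).mpr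
          ((PySem.Str.isIn_iff_infix snippet body).mp hisin))
      · rw [if_neg hts]
        have hgood : ∀ t ∈ ts, pvGood t := fun t ht => pvSplit_good snippet.toList t (by rw [htsdef] at ht; exact ht)
        obtain ⟨tok, rest, htsc⟩ : ∃ tok rest, ts = tok :: rest := by
          cases hc : ts with
          | nil => exact absurd hc hts
          | cons a b => exact ⟨a, b, rfl⟩
        obtain ⟨c0, t0, htok⟩ : ∃ c0 t0, tok = c0 :: t0 := by
          obtain ⟨h1, _⟩ := hgood tok (by rw [htsc]; exact List.mem_cons_self ..)
          cases hc : tok with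
          | nil => exact absurd hc h1
          | cons a b => exact ⟨a, b, rfl⟩
        have hc0 : PySem.Chars.isspace c0 = false := by
          obtain ⟨_, h2⟩ := hgood tok (by rw [htsc]; exact List.mem_cons_self ..)
          exact h2 c0 (by rw [htok]; exact List.mem_cons_self ..)
        have hnsshape : ns = c0 :: (t0 ++ pvWs rest) := by
          rw [hnsdef, htsc, pvJoin_shape, htok]
          simp
        have hLpos : 1 ≤ ns.length := by rw [hnsshape]; simp
        by_cases hf : PySem.Chars.find nb ns < 0
        · rw [if_pos hf]
          have hninf : ¬ ns <:+: nb := by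
            intro hinf
            have := (PySem.Chars.find_nonneg_iff nb ns).mpr hinf
            omega
          have hscan : pvScan body.toList ts 0 = (none, none) := by
            apply pvScan_none
            intro j _ hj
            rw [pvMatchTok_eq, pvNoMatchAt body.toList ts hgood hts j hj ?_]
            · rfl
            · intro p hp _ hpref
              exact hninf (hpref.isInfix.trans (List.drop_suffix p nb).isInfix)
          rw [hscan]
        · rw [if_neg hf]
          have hf0 : 0 ≤ PySem.Chars.find nb ns := by omega
          obtain ⟨hpre, hmin⟩ := PySem.Chars.find_spec hf0
          have hfind_cast : PySem.Chars.find nb ns = (((PySem.Chars.find nb ns).toNat : Nat) : Int) :=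
            (Int.toNat_of_nonneg hf0).symm
          set p' := (PySem.Chars.find nb ns).toNat with hp'def
          have hplen : p' < nb.length := by
            by_contra h
            push_neg at h
            rw [List.drop_eq_nil_of_le h, List.prefix_nil] at hpre
            rw [hpre] at hLpos
            simp at hLpos
          have hlennb : nb.length = P.length := by rw [hnbdef, List.length_map]
          have hplen' : p' < P.length := by omega
          have hnb0 : nb[p']'hplen = c0 := by
            obtain ⟨t, ht⟩ := hpre
            have : (nb.drop p')[0]? = some c0 := by
              rw [← ht]
              rw [List.getElem?_append_left (by rw [hnsshape]; simp)]
              rw [hnsshape]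
              rfl
            rw [List.getElem?_drop, Nat.add_zero, List.getElem?_eq_getElem hplen] at this
            simpa using this
          have hq : P[p']? = some (P[p']'hplen') := List.getElem?_eq_getElem hplen'
          have hnb0q : nb[p']? = some c0 := by
            rw [List.getElem?_eq_getElem hplen, hnb0]
          have hmapq : nb[p']? = (P[p']?).map Prod.fst := by rw [hnbdef, List.getElem?_map]
          have hPfst : PySem.Chars.isspace ((P[p']'hplen').1) = false := by
            rw [hq] at hmapq
            have h := hnb0q.symm.trans hmapq
            simp only [Option.map_some, Option.some.injEq] at h
            rw [← h]
            exact hc0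
          obtain ⟨k, hk1, hk2, hk3⟩ := pvNorm_drop body.toList false 0 p' hplen' hPfst
          rw [Nat.zero_add] at hk1 hk3
          have hpre' : ns <+: (pvNorm false k (body.toList.drop k)).map Prod.fst := by
            rw [← hk3, List.map_drop]
            exact hpre
          have hsome := ((pvTop ts hgood hts (body.toList.drop k) k).1).mp hpre'
          obtain ⟨n, hn⟩ := Option.isSome_iff_exists.mp hsome
          obtain ⟨hn1, hn2, hn3⟩ := (pvTop ts hgood hts (body.toList.drop k) k).2 n hn
          have hLle : ns.length ≤ nb.length - p' := by
            have := hpre.length_le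
            rw [List.length_drop] at this
            omega
          have e1 : PySem.List.pyGetD bm (PySem.Chars.find nb ns) 0 = (k : Int) := by
            rw [hfind_cast, PySem.List.pyGetD_natCast, List.getD_eq_getElem?_getD]
            have hbmq : bm[p']? = some ((k : Nat) : Int) := by
              rw [hbmdef, List.getElem?_map, hq]
              simp only [Option.map_some, Option.some.injEq]
              rw [hk1]
            rw [hbmq]
            rfl
          have hidx2 : p' + ns.length - 1 < P.length := by omega
          have hgetP : P[p' + ns.length - 1]? = some (P[p' + ns.length - 1]'hidx2) :=
            List.getElem?_eq_getElem hidx2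
          have hPsnd : (P[p' + ns.length - 1]'hidx2).2 = k + n - 1 := by
            have hidx : p' + ns.length - 1 = p' + (ns.length - 1) := by omega
            have h1 : P[p' + ns.length - 1]? = (pvNorm false k (body.toList.drop k))[ns.length - 1]? := by
              rw [hidx, ← List.getElem?_drop, hk3]
            rw [hgetP] at h1
            have := hn3
            rw [← h1] at this
            simp only [Option.map_some, Option.some.injEq] at this
            exact this
          have e2 : PySem.List.pyGetD bm (PySem.Chars.find nb ns + (ns.length : Int) - 1) 0 + 1
              = ((k + n : Nat) : Int) := by
            have hcast2 : PySem.Chars.find nb ns + (ns.length : Int) - 1 = ((p' + ns.length - 1 : Nat) : Int) := by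
              rw [hfind_cast]; omega
            rw [hcast2, PySem.List.pyGetD_natCast, List.getD_eq_getElem?_getD]
            have hbmq2 : bm[p' + ns.length - 1]? = some (((k + n - 1 : Nat)) : Int) := by
              rw [hbmdef, List.getElem?_map, hgetP]
              simp only [Option.map_some, Option.some.injEq]
              rw [hPsnd]
            rw [hbmq2]
            simp only [Option.getD_some]
            omega
          have hscan : pvScan body.toList ts 0 = (some ((k : Nat) : Int), some ((k + n : Nat) : Int)) := by
            apply pvScan_found body.toList ts 0 k _ (by omega) hk2
            · intro j _ hjk
              rw [pvMatchTok_eq, pvNoMatchAt body.toList ts hgood hts j (by omega) ?_]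
              · rfl
              · intro p hp hpj hpref
                have hmono := pvNorm_snd_pairwise body.toList false 0
                rw [List.pairwise_iff_getElem] at hmono
                have hplt : p < p' := by
                  by_contra hge
                  push_neg at hge
                  rcases Nat.eq_or_lt_of_le hge with heq | hlt
                  · subst heq
                    have hpj' : ((pvNorm false 0 body.toList)[p']'hplen').2 = j := hpj
                    omega
                  · have h1 : ((pvNorm false 0 body.toList)[p']'hplen').2
                        < ((pvNorm false 0 body.toList)[p]'hp).2 := hmono p' p hplen' hp hlt
                    have h2 : ((pvNorm false 0 body.toList)[p]'hp).2 = j := hpj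
                    omega
                exact hmin p hplt hpref
            · rw [pvMatchTok_eq, hn]
              rfl
          rw [hscan, e1, e2]


theorem find_snippet_bounds_py_changed : Claim_changed_find_snippet_bounds_py := by
  unfold Claim_changed_find_snippet_bounds_py; decide

theorem find_snippet_bounds_py_tight : Claim_exact_find_snippet_bounds_py := by
  unfold Claim_exact_find_snippet_bounds_py
  intro body snippet _ hD
  obtain ⟨hb, hiss, hisin⟩ := hD
  rw [PySem.Chars.strIsspace] at hiss
  simp only [Bool.and_eq_true, Bool.not_eq_true', List.isEmpty_eq_false_iff, List.all_eq_true] at hiss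
  obtain ⟨hsne, hall⟩ := hiss
  have hfneg : ¬ 0 ≤ PySem.Str.find body snippet := by
    intro h
    have hinf := (PySem.Str.find_nonneg_iff body snippet).mp h
    have := (PySem.Str.isIn_iff_infix snippet body).mpr hinf
    rw [hisin] at this
    cases this
  have hsplit : PySem.Chars.split₀ snippet.toList = [] := pvSplit_allspace _ hall
  have hB : find_snippet_bounds_py_alt body snippet = (none, none) := by
    simp only [find_snippet_bounds_py_alt]
    rw [if_neg (by simp [hb, hsne]), if_neg hfneg, if_pos hsplit]
  have hA : ∃ x y, find_snippet_bounds_py body snippet = (some x, some y) := by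
    simp only [find_snippet_bounds_py]
    rw [if_neg (by simp [hb, hsne]), if_neg hfneg, hsplit]
    rw [show PySem.Chars.join [' '] ([] : List (List Char)) = [] from rfl]
    rw [PySem.Chars.find_nil]
    rw [if_neg (by norm_num)]
    exact ⟨_, _, rfl⟩
  obtain ⟨x, y, hA⟩ := hA
  rw [hA, hB]
  simp
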